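-- pv_equiv track=rewrite | github.com/ryanbarouki/advent-of-code-2024 | day_21/21.py | apply_seq_to_pad
-- ===== SOURCE A (Python) =====
-- def apply_seq_to_pad(seq, pad):
--     pad_rev = {v:k for k,v in pad.items()}
--     dirs = {'>':(0,1), '<':(0,-1), '^':(-1,0),'v':(1,0)}
--     out = ''
--     i, j = pad['A']
--     for c in seq:
--         if c == 'A':
--             out += pad_rev[(i,j)]
--             continue
--         di, dj = dirs[c]
--         i,j = i+di, j+dj
--     return out
-- ===== SOURCE B (Python) =====
-- def apply_seq_to_pad(seq, pad):
--     # Two-pass decomposition: build the table of positions before each step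
--     # (prefix accumulation of displacement vectors, 'A' contributing (0,0)),
--     # then collect the key under every 'A' press in a single join.
--     dirs = {'>': (0, 1), '<': (0, -1), '^': (-1, 0), 'v': (1, 0), 'A': (0, 0)}
--     pos = [pad['A']]
--     for c in seq:
--         di, dj = dirs[c]
--         p = pos[-1]
--         pos.append((p[0] + di, p[1] + dj))
--     pad_rev = {v: k for k, v in pad.items()}
--     return ''.join(pad_rev[p] for c, p in zip(seq, pos) if c == 'A')
-- ===== Notes on version B (the rewrite author's own statement) =====
-- stated objective: alternative
-- what changed: Replaces A's single stateful loop (tracking position and appending to the output string) with a two-pass decomposition: first materialise the table of positions before each step by prefix-accumulating displacement vectors ('A' contributing (0,0)), then join the reverse-pad lookups at every 'A' press in one filter pass.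
import Mathlib
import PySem

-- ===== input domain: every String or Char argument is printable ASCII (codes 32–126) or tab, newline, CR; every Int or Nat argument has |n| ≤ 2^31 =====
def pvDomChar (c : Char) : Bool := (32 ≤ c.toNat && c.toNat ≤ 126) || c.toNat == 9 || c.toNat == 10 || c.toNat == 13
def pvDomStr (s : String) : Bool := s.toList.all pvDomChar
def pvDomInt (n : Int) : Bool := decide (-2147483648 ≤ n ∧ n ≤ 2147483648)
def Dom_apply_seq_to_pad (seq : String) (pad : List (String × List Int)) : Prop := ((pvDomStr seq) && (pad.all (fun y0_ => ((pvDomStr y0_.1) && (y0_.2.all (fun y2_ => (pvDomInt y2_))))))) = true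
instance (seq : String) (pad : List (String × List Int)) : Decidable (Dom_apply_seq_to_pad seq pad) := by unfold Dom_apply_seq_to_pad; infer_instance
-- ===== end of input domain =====

-- B replaces A's single stateful tracking loop by a prefix table of positions plus a
-- filter/lookup join pass (alternative decomposition, same output; return value only).

-- 'i, j = pad['A']': unpack a length-2 tuple (none = the KeyError/ValueError of
-- 'pad['A']' / unpacking, excluded by Pre_); shared unpacking helper of both ports
def pvPairA? (pad : List (String × List Int)) : Option (Int × Int) :=
  ((PySem.Dict.mk pad).get? "A").bind (fun v =>
    match v with
    | [i, j] => some (i, j)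
    | _ => none)

-- pad_rev = {v:k for k,v in pad.items()}  (dict comprehension, overwrite = insert);
-- the same comprehension appears verbatim in A and in B
def pvPadRev (pad : List (String × List Int)) : PySem.Dict (List Int) String :=
  pad.foldl (fun d kv => d.insert kv.2 kv.1) PySem.Dict.empty

-- ===== PORT A =====
-- dirs = {'>':(0,1), '<':(0,-1), '^':(-1,0), 'v':(1,0)}  (lookup; none = KeyError)
def pvDirsA (c : Char) : Option (Int × Int) :=
  if c = '>' then some (0, 1)
  else if c = '<' then some (0, -1)
  else if c = '^' then some (-1, 0)
  else if c = 'v' then some (1, 0)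
  else none

-- one iteration of A's for-loop; out is carried as List Char (Lean's String.append is
-- kernel-opaque); the 'none' arms are Python KeyErrors, excluded by Pre_
def pvStepA (pr : PySem.Dict (List Int) String)
    (st : List Char × Int × Int) (c : Char) : List Char × Int × Int :=
  if c = 'A' then
    match pr.get? [st.2.1, st.2.2] with
    | some k => (st.1 ++ k.toList, st.2.1, st.2.2)
    | none => st
  else
    match pvDirsA c with
    | some d => (st.1, st.2.1 + d.1, st.2.2 + d.2)
    | none => st

def apply_seq_to_pad (seq : String) (pad : List (String × List Int)) : String :=
  (pvPairA? pad).elim ""  -- i, j = pad['A']; the raising cases are excluded by Pre_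
    (fun p => String.ofList ((seq.toList.foldl (pvStepA (pvPadRev pad)) ([], p.1, p.2)).1))

-- ===== PORT B =====
-- dirs with 'A' mapped to the zero displacement
def pvDirsB (c : Char) : Option (Int × Int) :=
  if c = '>' then some (0, 1)
  else if c = '<' then some (0, -1)
  else if c = '^' then some (-1, 0)
  else if c = 'v' then some (1, 0)
  else if c = 'A' then some (0, 0)
  else none

def apply_seq_to_pad_alt (seq : String) (pad : List (String × List Int)) : String :=
  (pvPairA? pad).elim ""  -- pos = [pad['A']]; the raising cases are excluded by Pre_
    (fun p =>
      -- pos.append(pos[-1] + dirs[c]); the list is kept reversed, head = pos[-1]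
      let rev := seq.toList.foldl (fun (r : List (Int × Int)) c =>
          let q := r.headD p
          let d := (pvDirsB c).getD (0, 0)  -- KeyError: excluded by Pre_
          (q.1 + d.1, q.2 + d.2) :: r) [p]
      let pos := rev.reverse
      let pad_rev := pvPadRev pad
      -- ''.join(pad_rev[p] for c, p in zip(seq, pos) if c == 'A')  (missing key: excluded by Pre_)
      PySem.Str.join "" ((seq.toList.zip pos).filterMap
        (fun cp => if cp.1 = 'A' then pad_rev.get? [cp.2.1, cp.2.2] else none)))

-- ===== PRECONDITION & SPEC =====
def pvAllowed (c : Char) : Bool := c = 'A' || c = '>' || c = '<' || c = '^' || c = 'v'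

-- position before step k, in closed form by prefix counts of the four direction chars
def pvPosAt (i0 j0 : Int) (cs : List Char) (k : Nat) : List Int :=
  [i0 + ((cs.take k).count 'v' : Int) - ((cs.take k).count '^' : Int),
   j0 + ((cs.take k).count '>' : Int) - ((cs.take k).count '<' : Int)]

-- Exactly the inputs on which the Python A returns: pad has key 'A' with a length-2 value,
-- every char of seq is a keypad direction or 'A', and every pressed position is a pad value;
-- the Nodup conjunct only rules out association lists with duplicate keys, which cannot
-- arise from a Python dict.
def Pre_apply_seq_to_pad (seq : String) (pad : List (String × List Int)) : Prop :=
  (pad.map Prod.fst).Nodup ∧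
  (pvPairA? pad).elim False (fun p =>
    seq.toList.all pvAllowed = true ∧
    ∀ k < seq.toList.length, seq.toList.getD k ' ' = 'A' →
      pvPosAt p.1 p.2 seq.toList k ∈ pad.map Prod.snd)

instance (seq : String) (pad : List (String × List Int)) : Decidable (Pre_apply_seq_to_pad seq pad) := by
  unfold Pre_apply_seq_to_pad
  rcases pvPairA? pad with _ | p <;> simp only [Option.elim] <;> infer_instance

def pvWitness_apply_seq_to_pad : String × (List (String × List Int)) :=
  (">A", [("A", [0, 0]), ("B", [0, 1])])

def Spec_apply_seq_to_pad (seq : String) (pad : List (String × List Int)) (out : String) : Prop := out = apply_seq_to_pad_alt seq pad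
instance (seq : String) (pad : List (String × List Int)) (out : String) : Decidable (Spec_apply_seq_to_pad seq pad out) := by unfold Spec_apply_seq_to_pad; infer_instance

-- ===== CLAIM (what is proved, stated in full; the proofs are below) =====
def Claim_equal_apply_seq_to_pad : Prop := ∀ (seq : String) (pad : List (String × List Int)), Dom_apply_seq_to_pad seq pad → Pre_apply_seq_to_pad seq pad → Spec_apply_seq_to_pad seq pad (apply_seq_to_pad seq pad)

-- ===== LEMMAS AND PROOFS =====

-- the position sequence B materialises, as a structural recursion
def pvWalk : List Char → Int × Int → List (Int × Int)
  | [], p => [p]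
  | c :: cs, p =>
      let d := (pvDirsB c).getD (0, 0)
      p :: pvWalk cs (p.1 + d.1, p.2 + d.2)

theorem pvRev_build (q0 : Int × Int) (cs : List Char) (p : Int × Int) (r : List (Int × Int)) :
    cs.foldl (fun (r : List (Int × Int)) c =>
        let q := r.headD q0
        let d := (pvDirsB c).getD (0, 0)
        (q.1 + d.1, q.2 + d.2) :: r) (p :: r) = (pvWalk cs p).reverse ++ r := by
  induction cs generalizing p r with
  | nil => simp [pvWalk]
  | cons c cs ih =>
      simp only [List.foldl_cons, List.headD_cons]
      rw [ih]
      simp [pvWalk]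

theorem pvDirsB_eq_of_ne (c : Char) (hc : ¬ c = 'A') : pvDirsB c = pvDirsA c := by
  simp [pvDirsA, pvDirsB, hc]

theorem pvMain (pr : PySem.Dict (List Int) String) (cs : List Char) (p : Int × Int)
    (acc : List Char) :
    (cs.foldl (pvStepA pr) (acc, p.1, p.2)).1
      = acc ++ (((cs.zip (pvWalk cs p)).filterMap
          (fun cp => if cp.1 = 'A' then pr.get? [cp.2.1, cp.2.2] else none)).map
            String.toList).flatten := by
  induction cs generalizing p acc with
  | nil => simp [pvWalk]
  | cons c cs ih =>
      by_cases hc : c = 'A'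
      · subst hc
        have hz : (pvDirsB 'A').getD (0, 0) = (0, 0) := rfl
        cases hk : pr.get? [p.1, p.2] with
        | some k =>
            simp [pvWalk, pvStepA, hk, hz, ih p (acc ++ k.toList), List.append_assoc]
        | none =>
            simp [pvWalk, pvStepA, hk, hz, ih p acc]
      · have hd := pvDirsB_eq_of_ne c hc
        cases hA : pvDirsA c with
        | some d =>
            have hgd : (pvDirsB c).getD (0, 0) = d := by rw [hd, hA]; rfl
            simp [pvWalk, pvStepA, hc, hA, hgd, ih (p.1 + d.1, p.2 + d.2) acc]
        | none =>
            have hgd : (pvDirsB c).getD (0, 0) = (0, 0) := by rw [hd, hA]; rfl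
            simp [pvWalk, pvStepA, hc, hA, hgd, ih p acc]

theorem pvJoin_nil (ls : List (List Char)) : PySem.Chars.join [] ls = ls.flatten := by
  induction ls with
  | nil => simp [PySem.Chars.join_nil]
  | cons a t ih =>
      cases t with
      | nil => simp [PySem.Chars.join_singleton]
      | cons b t2 =>
          rw [PySem.Chars.join_cons_cons]
          simp [ih]

theorem apply_seq_to_pad_spec : Claim_equal_apply_seq_to_pad := by
  intro seq pad _ _
  unfold Spec_apply_seq_to_pad
  unfold apply_seq_to_pad apply_seq_to_pad_alt
  rcases h : pvPairA? pad with _ | p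
  · rfl
  · simp only [Option.elim]
    rw [pvRev_build p seq.toList p []]
    rw [List.append_nil, List.reverse_reverse]
    have hm := pvMain (pvPadRev pad) seq.toList p []
    simp only [List.nil_append] at hm
    rw [hm]
    apply String.toList_inj.mp
    simp [PySem.Str.join, pvJoin_nil]
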